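-- pv_equiv track=rewrite | github.com/khiem11/hamter | bothamter.py | categorize_promo_codes
-- ===== SOURCE A (Python) =====
-- def categorize_promo_codes(promo_keys):
--     categories = {
--         'BIKE': [], 'CUBE': [], 'TRAIN': [], 'CLONE': []
--     }
--     for key in promo_keys:
--         for category in categories:
--             if key.startswith(category):
--                 categories[category].append(key)
--                 break
--     return categories
-- ===== SOURCE B (Python) =====
-- def categorize_promo_codes(promo_keys):
--     return {c: [k for k in promo_keys if k.startswith(c)]
--             for c in ('BIKE', 'CUBE', 'TRAIN', 'CLONE')}
-- ===== Notes on version B (the rewrite author's own statement) =====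
-- stated objective: idiomatic
-- what changed: Replaces the single pass with a first-match inner loop and break by a dict comprehension that builds each of the four buckets independently with one filter per prefix (safe because the four prefixes are mutually exclusive).
import Mathlib
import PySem

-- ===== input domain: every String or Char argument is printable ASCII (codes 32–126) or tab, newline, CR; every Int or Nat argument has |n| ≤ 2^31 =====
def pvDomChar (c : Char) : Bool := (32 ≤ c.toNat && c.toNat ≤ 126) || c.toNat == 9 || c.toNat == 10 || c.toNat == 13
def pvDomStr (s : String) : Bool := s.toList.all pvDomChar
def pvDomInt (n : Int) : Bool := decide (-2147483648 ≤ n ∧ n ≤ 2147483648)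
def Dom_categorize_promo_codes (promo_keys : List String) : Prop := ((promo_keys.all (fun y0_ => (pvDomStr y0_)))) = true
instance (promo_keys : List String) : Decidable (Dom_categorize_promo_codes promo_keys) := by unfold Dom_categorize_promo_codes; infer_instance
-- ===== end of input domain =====

-- B replaces A's single pass with first-match/break over the dict's keys by one independent
-- filter per (mutually exclusive) prefix: an idiomatic dict comprehension, same cost.


-- ===== PORT A =====
-- inner 'for category in categories: if key.startswith(category): …append…; break'
def pvInnerA (d : PySem.Dict String (List String)) (cats : List String) (key : String) :
    PySem.Dict String (List String) :=
  match cats with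
  | [] => d
  | c :: rest =>
      if PySem.Str.startswith key c then d.modify c [] (fun v => v ++ [key])
      else pvInnerA d rest key

def categorize_promo_codes (promo_keys : List String) : List (String × List String) :=
  (promo_keys.foldl
      (fun d key => pvInnerA d d.keys key)
      (PySem.Dict.ofList [("BIKE", []), ("CUBE", []), ("TRAIN", []), ("CLONE", [])])).items

-- ===== PORT B =====
def categorize_promo_codes_alt (promo_keys : List String) : List (String × List String) :=
  ["BIKE", "CUBE", "TRAIN", "CLONE"].map
    (fun c => (c, promo_keys.filter (fun k => PySem.Str.startswith k c)))

-- ===== PRECONDITION & SPEC =====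
def Spec_categorize_promo_codes (promo_keys : List String) (out : List (String × List String)) : Prop := out = categorize_promo_codes_alt promo_keys
instance (promo_keys : List String) (out : List (String × List String)) : Decidable (Spec_categorize_promo_codes promo_keys out) := by unfold Spec_categorize_promo_codes; infer_instance

-- ===== CLAIM (what is proved, stated in full; the proofs are below) =====
def Claim_equal_categorize_promo_codes : Prop := ∀ (promo_keys : List String), Dom_categorize_promo_codes promo_keys → Spec_categorize_promo_codes promo_keys (categorize_promo_codes promo_keys)

-- ===== LEMMAS AND PROOFS =====

-- two distinct prefixes of the four cannot both be prefixes of the same key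
lemma pv_excl {key p q : String} (hlen : p.toList.length ≤ q.toList.length)
    (hnp : ¬ p.toList <+: q.toList)
    (hp : PySem.Str.startswith key p = true) : PySem.Str.startswith key q = false := by
  rw [PySem.Str.startswith_eq] at hp ⊢
  rw [PySem.Chars.startswith_iff] at hp
  by_contra h
  rw [Bool.not_eq_false, PySem.Chars.startswith_iff] at h
  rcases List.prefix_or_prefix_of_prefix hp h with hpq | hqp
  · exact hnp hpq
  · exact hnp (hqp.eq_of_length (le_antisymm hqp.length_le hlen) ▸ List.prefix_refl _)

-- loop invariant for A's fold over the four-bucket dict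
lemma pv_inv (keys : List String) (l1 l2 l3 l4 : List String) :
    (keys.foldl (fun d key => pvInnerA d d.keys key)
        (PySem.Dict.mk [("BIKE", l1), ("CUBE", l2), ("TRAIN", l3), ("CLONE", l4)])).items
    = [("BIKE", l1 ++ keys.filter (fun k => PySem.Str.startswith k "BIKE")),
       ("CUBE", l2 ++ keys.filter (fun k => PySem.Str.startswith k "CUBE")),
       ("TRAIN", l3 ++ keys.filter (fun k => PySem.Str.startswith k "TRAIN")),
       ("CLONE", l4 ++ keys.filter (fun k => PySem.Str.startswith k "CLONE"))] := by
  induction keys generalizing l1 l2 l3 l4 with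
  | nil => simp
  | cons k rest ih =>
      simp only [List.foldl_cons, List.filter_cons]
      have hkeys : (PySem.Dict.mk [("BIKE", l1), ("CUBE", l2), ("TRAIN", l3), ("CLONE", l4)]).keys
          = ["BIKE", "CUBE", "TRAIN", "CLONE"] := by simp [PySem.Dict.keys]
      rw [hkeys]
      by_cases h1 : PySem.Str.startswith k "BIKE" = true
      · have e2 := pv_excl (p := "BIKE") (q := "CUBE") (by decide) (by decide) h1
        have e3 := pv_excl (p := "BIKE") (q := "TRAIN") (by decide) (by decide) h1
        have e4 := pv_excl (p := "BIKE") (q := "CLONE") (by decide) (by decide) h1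
        simp only [pvInnerA]
        rw [if_pos h1]
        rw [show (PySem.Dict.mk [("BIKE", l1), ("CUBE", l2), ("TRAIN", l3), ("CLONE", l4)]).modify
              "BIKE" [] (fun v => v ++ [k])
            = PySem.Dict.mk [("BIKE", l1 ++ [k]), ("CUBE", l2), ("TRAIN", l3), ("CLONE", l4)] from rfl]
        rw [ih]
        simp only [h1, e2, e3, e4, Bool.false_eq_true, if_true, if_false, List.append_assoc,
          List.singleton_append]
      · by_cases h2 : PySem.Str.startswith k "CUBE" = true
        · have e3 := pv_excl (p := "CUBE") (q := "TRAIN") (by decide) (by decide) h2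
          have e4 := pv_excl (p := "CUBE") (q := "CLONE") (by decide) (by decide) h2
          simp only [pvInnerA]
          rw [if_neg h1, if_pos h2]
          rw [show (PySem.Dict.mk [("BIKE", l1), ("CUBE", l2), ("TRAIN", l3), ("CLONE", l4)]).modify
                "CUBE" [] (fun v => v ++ [k])
              = PySem.Dict.mk [("BIKE", l1), ("CUBE", l2 ++ [k]), ("TRAIN", l3), ("CLONE", l4)] from rfl]
          rw [ih]
          have e1 : PySem.Str.startswith k "BIKE" = false := by
            exact Bool.not_eq_true _ |>.mp h1
          simp only [h2, e1, e3, e4, Bool.false_eq_true, if_true, if_false, List.append_assoc,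
            List.singleton_append]
        · by_cases h3 : PySem.Str.startswith k "TRAIN" = true
          · have e4 := pv_excl (p := "TRAIN") (q := "CLONE") (by decide) (by decide) h3
            simp only [pvInnerA]
            rw [if_neg h1, if_neg h2, if_pos h3]
            rw [show (PySem.Dict.mk [("BIKE", l1), ("CUBE", l2), ("TRAIN", l3), ("CLONE", l4)]).modify
                  "TRAIN" [] (fun v => v ++ [k])
                = PySem.Dict.mk [("BIKE", l1), ("CUBE", l2), ("TRAIN", l3 ++ [k]), ("CLONE", l4)] from rfl]
            rw [ih]
            have e1 : PySem.Str.startswith k "BIKE" = false := Bool.not_eq_true _ |>.mp h1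
            have e2 : PySem.Str.startswith k "CUBE" = false := Bool.not_eq_true _ |>.mp h2
            simp only [h3, e1, e2, e4, Bool.false_eq_true, if_true, if_false, List.append_assoc,
              List.singleton_append]
          · by_cases h4 : PySem.Str.startswith k "CLONE" = true
            · simp only [pvInnerA]
              rw [if_neg h1, if_neg h2, if_neg h3, if_pos h4]
              rw [show (PySem.Dict.mk [("BIKE", l1), ("CUBE", l2), ("TRAIN", l3), ("CLONE", l4)]).modify
                    "CLONE" [] (fun v => v ++ [k])
                  = PySem.Dict.mk [("BIKE", l1), ("CUBE", l2), ("TRAIN", l3), ("CLONE", l4 ++ [k])] from rfl]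
              rw [ih]
              have e1 : PySem.Str.startswith k "BIKE" = false := Bool.not_eq_true _ |>.mp h1
              have e2 : PySem.Str.startswith k "CUBE" = false := Bool.not_eq_true _ |>.mp h2
              have e3 : PySem.Str.startswith k "TRAIN" = false := Bool.not_eq_true _ |>.mp h3
              simp only [h4, e1, e2, e3, Bool.false_eq_true, if_true, if_false, List.append_assoc,
                List.singleton_append]
            · simp only [pvInnerA]
              rw [if_neg h1, if_neg h2, if_neg h3,
                if_neg h4]
              rw [ih]
              have e1 : PySem.Str.startswith k "BIKE" = false := Bool.not_eq_true _ |>.mp h1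
              have e2 : PySem.Str.startswith k "CUBE" = false := Bool.not_eq_true _ |>.mp h2
              have e3 : PySem.Str.startswith k "TRAIN" = false := Bool.not_eq_true _ |>.mp h3
              have e4 : PySem.Str.startswith k "CLONE" = false := Bool.not_eq_true _ |>.mp h4
              simp only [e1, e2, e3, e4, Bool.false_eq_true, if_false]

-- ===== VERDICT (by name: the statement is the Claim_ definition above) =====
theorem categorize_promo_codes_spec : Claim_equal_categorize_promo_codes := by
  intro promo_keys _
  unfold Spec_categorize_promo_codes categorize_promo_codes categorize_promo_codes_alt
  rw [show PySem.Dict.ofList [("BIKE", ([] : List String)), ("CUBE", []), ("TRAIN", []), ("CLONE", [])]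
      = PySem.Dict.mk [("BIKE", []), ("CUBE", []), ("TRAIN", []), ("CLONE", [])] from by decide]
  rw [pv_inv]
  simp
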